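-- pv_equiv track=rewrite | github.com/acornaeology/acornaeology.github.io | generator/disassembly.py | _find_break_position
-- ===== SOURCE A (Python) =====
-- def _find_break_position(word, budget):
--     """Find the best position to break a long word at or before budget.
--
--     Prefers breaking near internal punctuation (|, _, /, -), then at
--     character class transitions (letter/digit/punctuation boundaries),
--     and falls back to the exact budget position."""
--     if budget <= 0:
--         budget = 1
--
--     # Preferred: break after punctuation characters
--     best = -1
--     for i in range(min(budget, len(word)) - 1, 0, -1):
--         if word[i] in "|_/-":
--             best = i + 1
--             break
--     if best > 0:
--         return best
--
--     # Second: break at character class transitions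
--     for i in range(min(budget, len(word)) - 1, 0, -1):
--         a, b = word[i - 1], word[i]
--         if (a.isalpha() != b.isalpha()) or (a.isdigit() != b.isdigit()):
--             return i
--     if best > 0:
--         return best
--
--     # Last resort: break at exact boundary
--     return min(budget, len(word))
-- ===== SOURCE B (Python) =====
-- def _find_break_position(word, budget):
--     """Find the best position to break a long word at or before budget.
--
--     Single forward pass: remember the highest punctuation index and the
--     highest character-class-transition index, then pick in priority order."""
--     if budget <= 0:
--         budget = 1
--     limit = min(budget, len(word))
--     last_punct = -1
--     last_trans = -1
--     for i in range(1, limit):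
--         if word[i] in "|_/-":
--             last_punct = i
--         a, b = word[i - 1], word[i]
--         if (a.isalpha() != b.isalpha()) or (a.isdigit() != b.isdigit()):
--             last_trans = i
--     if last_punct >= 0:
--         return last_punct + 1
--     if last_trans >= 0:
--         return last_trans
--     return limit
-- ===== Notes on version B (the rewrite author's own statement) =====
-- stated objective: alternative
-- what changed: Replaces A's two backward early-exit scans (punctuation, then class transitions) by a single forward pass that accumulates the highest punctuation index and the highest transition index and then picks in priority order.
import Mathlib
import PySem

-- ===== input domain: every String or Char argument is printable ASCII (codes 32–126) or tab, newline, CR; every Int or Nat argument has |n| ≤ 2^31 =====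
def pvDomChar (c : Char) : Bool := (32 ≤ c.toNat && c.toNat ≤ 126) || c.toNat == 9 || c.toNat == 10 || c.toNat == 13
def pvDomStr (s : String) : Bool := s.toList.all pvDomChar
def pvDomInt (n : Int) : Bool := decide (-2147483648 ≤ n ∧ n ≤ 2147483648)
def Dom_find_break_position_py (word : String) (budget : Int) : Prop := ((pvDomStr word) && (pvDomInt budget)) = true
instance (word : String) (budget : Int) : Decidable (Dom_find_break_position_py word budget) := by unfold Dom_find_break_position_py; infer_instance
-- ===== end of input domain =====

-- B replaces A's two backward early-exit scans by one forward pass that keeps the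
-- highest punctuation index and the highest class-transition index (objective: alternative).

-- ===== PORT A =====
def fbpPunct (c : Char) : Bool := c = '|' || c = '_' || c = '/' || c = '-'

def fbpTrans (a b : Char) : Bool :=
  (PySem.Chars.isalpha a != PySem.Chars.isalpha b) ||
  (PySem.Chars.isdigit a != PySem.Chars.isdigit b)

-- first backward loop: first punctuation hit (indices given in descending order)
def fbpA_loop1 (cs : List Char) : List Int → Int
  | [] => -1
  | i :: rest =>
    if fbpPunct (PySem.List.pyGetD cs i ' ') then i + 1 else fbpA_loop1 cs rest

-- second backward loop: first class-transition hit, else the fallback min(budget,len)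
def fbpA_loop2 (cs : List Char) (lim : Int) : List Int → Int
  | [] => lim
  | i :: rest =>
    if fbpTrans (PySem.List.pyGetD cs (i - 1) ' ') (PySem.List.pyGetD cs i ' ')
    then i else fbpA_loop2 cs lim rest

def find_break_position_py (word : String) (budget : Int) : Int :=
  let cs := word.toList
  let b := if budget ≤ 0 then 1 else budget
  let lim := min b (cs.length : Int)
  let idxs := PySem.List.pyRange (lim - 1) 0 (-1)
  let best := fbpA_loop1 cs idxs
  if best > 0 then best else fbpA_loop2 cs lim idxs

-- ===== PORT B =====
def fbpB_step (cs : List Char) (st : Int × Int) (i : Int) : Int × Int :=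
  ((if fbpPunct (PySem.List.pyGetD cs i ' ') then i else st.1),
   (if fbpTrans (PySem.List.pyGetD cs (i - 1) ' ') (PySem.List.pyGetD cs i ' ')
    then i else st.2))

def find_break_position_py_alt (word : String) (budget : Int) : Int :=
  let cs := word.toList
  let b := if budget ≤ 0 then 1 else budget
  let lim := min b (cs.length : Int)
  let st := (PySem.List.pyRange 1 lim 1).foldl (fbpB_step cs) (-1, -1)
  if st.1 ≥ 0 then st.1 + 1 else if st.2 ≥ 0 then st.2 else lim

-- ===== PRECONDITION & SPEC =====
def Spec_find_break_position_py (word : String) (budget : Int) (out : Int) : Prop := out = find_break_position_py_alt word budget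
instance (word : String) (budget : Int) (out : Int) : Decidable (Spec_find_break_position_py word budget out) := by unfold Spec_find_break_position_py; infer_instance

-- ===== CLAIM (what is proved, stated in full; the proofs are below) =====
def Claim_equal_find_break_position_py : Prop := ∀ (word : String) (budget : Int), Dom_find_break_position_py word budget → Spec_find_break_position_py word budget (find_break_position_py word budget)

-- ===== LEMMAS AND PROOFS =====

-- A's first backward loop over reversed indices = B's keep-last forward fold
-- B's pair fold is the two independent keep-last folds
theorem fbpB_fold (cs : List Char) (l : List Int) (a b : Int) :
    l.foldl (fbpB_step cs) (a, b) =
      (l.foldl (fun s i => if fbpPunct (PySem.List.pyGetD cs i ' ') then i else s) a,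
       l.foldl (fun s i => if fbpTrans (PySem.List.pyGetD cs (i - 1) ' ') (PySem.List.pyGetD cs i ' ') then i else s) b) := by
  have h : fbpB_step cs = fun (st : Int × Int) (i : Int) =>
      ((if fbpPunct (PySem.List.pyGetD cs i ' ') then i else st.1),
       (if fbpTrans (PySem.List.pyGetD cs (i - 1) ' ') (PySem.List.pyGetD cs i ' ') then i else st.2)) := rfl
  rw [h, PySem.List.foldl_prod_mk
    (f := fun s i => if fbpPunct (PySem.List.pyGetD cs i ' ') then i else s)
    (g := fun s i => if fbpTrans (PySem.List.pyGetD cs (i - 1) ' ') (PySem.List.pyGetD cs i ' ') then i else s)]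

theorem fbpA_loop1_reverse (cs : List Char) (l : List Int) (h : ∀ i ∈ l, 0 ≤ i) :
    fbpA_loop1 cs l.reverse =
      (if l.foldl (fun a i => if fbpPunct (PySem.List.pyGetD cs i ' ') then i else a) (-1 : Int) ≥ 0
       then l.foldl (fun a i => if fbpPunct (PySem.List.pyGetD cs i ' ') then i else a) (-1 : Int) + 1
       else -1) := by
  induction l using List.reverseRecOn with
  | nil => simp [fbpA_loop1]
  | append_singleton l i ih =>
    simp only [List.reverse_append, List.reverse_singleton, List.singleton_append,
      List.foldl_append, List.foldl_cons, List.foldl_nil, fbpA_loop1]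
    by_cases hp : fbpPunct (PySem.List.pyGetD cs i ' ')
    · have hi : (0:Int) ≤ i := h i (by simp)
      simp [hp, hi]
    · simp only [hp]
      exact ih (fun j hj => h j (by simp [hj]))

-- A's second backward loop over reversed indices = B's keep-last forward fold
theorem fbpA_loop2_reverse (cs : List Char) (lim : Int) (l : List Int) (h : ∀ i ∈ l, 0 ≤ i) :
    fbpA_loop2 cs lim l.reverse =
      (if l.foldl (fun a i =>
          if fbpTrans (PySem.List.pyGetD cs (i - 1) ' ') (PySem.List.pyGetD cs i ' ')
          then i else a) (-1 : Int) ≥ 0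
       then l.foldl (fun a i =>
          if fbpTrans (PySem.List.pyGetD cs (i - 1) ' ') (PySem.List.pyGetD cs i ' ')
          then i else a) (-1 : Int)
       else lim) := by
  induction l using List.reverseRecOn with
  | nil => simp [fbpA_loop2]
  | append_singleton l i ih =>
    simp only [List.reverse_append, List.reverse_singleton, List.singleton_append,
      List.foldl_append, List.foldl_cons, List.foldl_nil, fbpA_loop2]
    by_cases ht : fbpTrans (PySem.List.pyGetD cs (i - 1) ' ') (PySem.List.pyGetD cs i ' ')
    · have hi : (0:Int) ≤ i := h i (by simp)
      simp [ht, hi]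
    · simp only [ht]
      exact ih (fun j hj => h j (by simp [hj]))

-- ===== VERDICT (by name: the statement is the Claim_ definition above) =====
theorem find_break_position_py_spec : Claim_equal_find_break_position_py := by
  intro word budget _
  unfold Spec_find_break_position_py find_break_position_py find_break_position_py_alt
  simp only
  set cs := word.toList with hcs
  set b := if budget ≤ 0 then 1 else budget with hb
  set lim := min b (cs.length : Int) with hlim
  have hrev : PySem.List.pyRange (lim - 1) 0 (-1) = (PySem.List.pyRange 1 lim 1).reverse := by
    rw [PySem.List.pyRange_neg_one_eq_reverse]
    norm_num
  have hmem : ∀ i ∈ PySem.List.pyRange 1 lim 1, (0:Int) ≤ i := by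
    intro i hi
    rw [PySem.List.mem_pyRange_one] at hi
    omega
  rw [hrev, fbpA_loop1_reverse cs _ hmem, fbpA_loop2_reverse cs lim _ hmem, fbpB_fold]
  set vp := (PySem.List.pyRange 1 lim 1).foldl (fun a i => if fbpPunct (PySem.List.pyGetD cs i ' ') then i else a) (-1 : Int)
  set vt := (PySem.List.pyRange 1 lim 1).foldl (fun a i => if fbpTrans (PySem.List.pyGetD cs (i - 1) ' ') (PySem.List.pyGetD cs i ' ') then i else a) (-1 : Int)
  by_cases hp : vp ≥ 0 <;> simp [hp]
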